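-- pv_equiv track=rewrite | github.com/canelhasmateus/leet | signal/private/004.py | solution
-- ===== SOURCE A (Python) =====
-- def solution( words ):
--
-- 	count = 0
-- 	words = [ i for i in sorted( words )]
--
-- 	# A prefix must come before when sorted.
--
-- 	for i in range( len( words) - 1):
--
-- 		word = words[i ]
-- 		inc = 1
--
-- 		while True:
-- 			try :
-- 				next = words[ i + inc]
-- 			except:
-- 				break
--
-- 			if not next.startswith( word ):
-- 				break
-- 			else:
-- 				count+=1
-- 				inc += 1
--
-- 	return count
-- ===== SOURCE B (Python) =====
-- def solution(words):
--     # count unordered pairs of positions where one word is a prefix of the other;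
--     # no sorting: direct symmetric pair scan over the original list.
--     count = 0
--     for k in range(len(words)):
--         w = words[k]
--         for v in words[k + 1:]:
--             if w.startswith(v) or v.startswith(w):
--                 count += 1
--     return count
-- ===== Notes on version B (the rewrite author's own statement) =====
-- stated objective: simpler
-- what changed: A sorts the list and counts consecutive prefix runs with an early break; B drops the sort entirely and counts all unordered position pairs with a symmetric one-is-prefix-of-the-other test in a plain double loop.
import Mathlib
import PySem

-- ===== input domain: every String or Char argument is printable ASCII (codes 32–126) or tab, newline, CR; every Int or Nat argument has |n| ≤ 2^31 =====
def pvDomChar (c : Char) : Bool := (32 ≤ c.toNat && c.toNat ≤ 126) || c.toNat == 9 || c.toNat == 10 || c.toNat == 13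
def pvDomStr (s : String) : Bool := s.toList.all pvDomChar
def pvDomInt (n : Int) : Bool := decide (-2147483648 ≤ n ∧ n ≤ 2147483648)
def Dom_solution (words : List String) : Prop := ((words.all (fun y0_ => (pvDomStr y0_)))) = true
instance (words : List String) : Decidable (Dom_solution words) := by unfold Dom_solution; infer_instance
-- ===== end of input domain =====

-- B removes A's sort+run-scan in favour of a plain symmetric all-pairs count (objective: simpler).

-- ===== PORT A =====
-- inner 'while True' of A: from index j, count consecutive entries starting with `word`
-- (the try/except IndexError is the j < ws.length bound; indices here are always ≥ 1)
def solWhile (ws : List String) (word : String) (j : Nat) : Int :=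
  if h : j < ws.length then
    if PySem.Str.startswith ws[j] word then 1 + solWhile ws word (j + 1) else 0
  else 0
termination_by ws.length - j

def solution (words : List String) : Int :=
  let ws := PySem.List.sorted words (fun x => x) false
  (List.range (ws.length - 1)).foldl (fun count i => count + solWhile ws (ws.getD i "") (i + 1)) 0

-- ===== PORT B =====
def solution_alt (words : List String) : Int :=
  match words with
  | [] => 0
  | w :: rest =>
      rest.foldl (fun c v => if PySem.Str.startswith w v || PySem.Str.startswith v w then c + 1 else c) 0
        + solution_alt rest

-- ===== PRECONDITION & SPEC =====
def Spec_solution (words : List String) (out : Int) : Prop := out = solution_alt words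
instance (words : List String) (out : Int) : Decidable (Spec_solution words out) := by unfold Spec_solution; infer_instance

-- ===== CLAIM (what is proved, stated in full; the proofs are below) =====
def Claim_equal_solution : Prop := ∀ (words : List String), Dom_solution words → Spec_solution words (solution words)

-- ===== LEMMAS AND PROOFS =====

-- `pfx w v` : w is a prefix of v (Python v.startswith(w))
def pfx (w v : String) : Bool := PySem.Str.startswith v w
-- symmetric relation of B
def symR (w v : String) : Bool := PySem.Str.startswith w v || PySem.Str.startswith v w

theorem symR_comm (a b : String) : symR a b = symR b a := by
  simp [symR, Bool.or_comm]

theorem foldl_count (w : String) (l : List String) (c : Int) :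
    l.foldl (fun c v => if symR w v then c + 1 else c) c = c + (l.countP (symR w) : Int) := by
  induction l generalizing c with
  | nil => simp
  | cons v t ih =>
    simp only [List.foldl_cons, List.countP_cons, ih]
    by_cases h : symR w v = true
    · simp [h]; ring
    · simp [h]

theorem alt_cons (w : String) (rest : List String) :
    solution_alt (w :: rest) = (rest.countP (symR w) : Int) + solution_alt rest := by
  show rest.foldl (fun c v => if symR w v then c + 1 else c) 0 + solution_alt rest = _
  rw [foldl_count]
  ring

theorem alt_perm {l l' : List String} (h : l.Perm l') : solution_alt l = solution_alt l' := by
  induction h with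
  | nil => rfl
  | cons x _ ih => rw [alt_cons, alt_cons, ih]; congr 2; exact (List.Perm.countP_eq _ ‹_›)
  | swap x y l =>
    rw [alt_cons, alt_cons, alt_cons, alt_cons]
    simp only [List.countP_cons, symR_comm x y]
    push_cast; ring
  | trans _ _ ih1 ih2 => rw [ih1, ih2]

-- the Mathlib lexicographic order on List Char, unfolded one cons at a time
theorem charlist_cons_lt_iff {a b : Char} {l m : List Char} :
    (a :: l : List Char) < b :: m ↔ a < b ∨ (a = b ∧ l < m) := by
  show List.Lex (· < ·) _ _ ↔ _
  constructor
  · intro h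
    cases h with
    | cons h => exact Or.inr ⟨rfl, h⟩
    | rel h => exact Or.inl h
  · rintro (h | ⟨rfl, h⟩)
    · exact List.Lex.rel h
    · exact List.Lex.cons h

theorem charlist_cons_le_iff {a b : Char} {l m : List Char} :
    (a :: l : List Char) ≤ b :: m ↔ a < b ∨ (a = b ∧ l ≤ m) := by
  rw [le_iff_lt_or_eq, @le_iff_lt_or_eq (List Char) _ l m, charlist_cons_lt_iff]
  constructor
  · rintro ((h | ⟨rfl, h⟩) | h)
    · exact Or.inl h
    · exact Or.inr ⟨rfl, Or.inl h⟩
    · obtain ⟨rfl, rfl⟩ : a = b ∧ l = m := by injection h with h1 h2; exact ⟨h1, h2⟩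
      exact Or.inr ⟨rfl, Or.inr rfl⟩
  · rintro (h | ⟨rfl, h | rfl⟩)
    · exact Or.inl (Or.inl h)
    · exact Or.inl (Or.inr ⟨rfl, h⟩)
    · exact Or.inr rfl

theorem charlist_not_cons_le_nil {a : Char} {l : List Char} : ¬ (a :: l : List Char) ≤ [] := by
  rw [le_iff_lt_or_eq]
  rintro (h | h)
  · exact (by cases (show List.Lex (· < ·) (a :: l) [] from h))
  · simp at h

-- the interval property of the prefix relation under lexicographic order
theorem prefix_between (w : List Char) : ∀ v u : List Char, w ≤ v → v ≤ u → w <+: u → w <+: v := by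
  induction w with
  | nil => intro v u _ _ _; exact List.nil_prefix
  | cons c w' ih =>
    intro v u hwv hvu hwu
    obtain ⟨t, rfl⟩ := hwu
    match v with
    | [] => exact absurd hwv charlist_not_cons_le_nil
    | d :: v' =>
      rcases charlist_cons_le_iff.mp hwv with hcd | ⟨rfl, hwv'⟩
      · rcases charlist_cons_le_iff.mp hvu with hdc | ⟨rfl, _⟩
        · exact absurd hcd (lt_asymm hdc)
        · exact absurd hcd (lt_irrefl _)
      · rcases charlist_cons_le_iff.mp hvu with hdc | ⟨_, hv'u⟩
        · exact absurd hdc (lt_irrefl _)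
        · exact List.cons_prefix_cons.mpr ⟨rfl, ih v' (w' ++ t) hwv' hv'u ⟨t, rfl⟩⟩

theorem charlist_prefix_le {w v : List Char} (h : w <+: v) : w ≤ v := by
  obtain ⟨t, rfl⟩ := h
  induction w with
  | nil =>
    match t with
    | [] => exact le_refl _
    | c :: t' => exact le_of_lt (List.Lex.nil)
  | cons c w' ih => exact charlist_cons_le_iff.mpr (Or.inr ⟨rfl, ih⟩)

theorem pfx_le {w v : String} (h : pfx w v = true) : w ≤ v := by
  rw [String.le_iff_toList_le]
  exact charlist_prefix_le ((PySem.Chars.startswith_iff _ _).mp (by simpa [pfx] using h))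

theorem pfx_mono {w v u : String} (hwv : w ≤ v) (hvu : v ≤ u)
    (h : pfx w u = true) : pfx w v = true := by
  simp only [pfx, PySem.Str.startswith_eq] at h ⊢
  rw [PySem.Chars.startswith_iff] at h ⊢
  exact prefix_between w.toList v.toList u.toList (String.le_iff_toList_le.mp hwv)
    (String.le_iff_toList_le.mp hvu) h

theorem takeWhile_eq_countP (w : String) (l : List String)
    (hp : l.Pairwise (· ≤ ·)) (hw : ∀ v ∈ l, w ≤ v) :
    (l.takeWhile (pfx w)).length = l.countP (pfx w) := by
  induction l with
  | nil => rfl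
  | cons v t ih =>
    rcases List.pairwise_cons.mp hp with ⟨hv, ht⟩
    by_cases h : pfx w v = true
    · rw [List.takeWhile_cons_of_pos h]
      simp [h, ih ht (fun u hu => hw u (List.mem_cons_of_mem _ hu))]
    · rw [List.takeWhile_cons_of_neg h]
      have hz : t.countP (pfx w) = 0 := by
        rw [List.countP_eq_zero]
        intro u hu hpu
        exact h (pfx_mono (hw v List.mem_cons_self) (hv u hu) hpu)
      simp [h, hz]

theorem countP_symR_eq_pfx (w : String) (l : List String) (hw : ∀ v ∈ l, w ≤ v) :
    l.countP (symR w) = l.countP (pfx w) := by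
  apply List.countP_congr
  intro v hv
  simp only [symR, pfx]
  constructor
  · intro h2
    rcases Bool.or_eq_true_iff.mp h2 with h3 | h3
    · -- v is a prefix of w; since w ≤ v this forces v = w, so w starts with v too
      have hvw : v ≤ w := pfx_le (show pfx v w = true from h3)
      have hv' : v = w := le_antisymm hvw (hw v hv)
      subst hv'
      rw [PySem.Str.startswith_eq]
      exact (PySem.Chars.startswith_iff _ _).mpr List.prefix_rfl
    · exact h3
  · intro h2
    exact Bool.or_eq_true_iff.mpr (Or.inr h2)

-- A's indexed double loop, expressed structurally on the sorted list
def gRun : List String → Int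
  | [] => 0
  | w :: rest => ((rest.takeWhile (pfx w)).length : Int) + gRun rest

theorem solWhile_eq (ws : List String) (word : String) (j : Nat) :
    solWhile ws word j = (((ws.drop j).takeWhile (pfx word)).length : Int) := by
  fun_induction solWhile ws word j with
  | case1 j h htrue ih =>
    rw [← List.getElem_cons_drop h, List.takeWhile_cons_of_pos (by simpa [pfx] using htrue)]
    simp [ih]
    omega
  | case2 j h hfalse =>
    rw [← List.getElem_cons_drop h, List.takeWhile_cons_of_neg (by simpa [pfx] using hfalse)]
    simp
  | case3 j h =>
    rw [List.drop_eq_nil_of_le (by omega)]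
    simp

theorem foldl_add_eq_sum (f : Nat → Int) (l : List Nat) (c : Int) :
    l.foldl (fun c i => c + f i) c = c + (l.map f).sum := by
  induction l generalizing c with
  | nil => simp
  | cons x t ih => simp [ih]; ring

theorem sum_range_eq_gRun (ws : List String) :
    ((List.range (ws.length - 1)).map
      (fun i => (((ws.drop (i + 1)).takeWhile (pfx (ws.getD i ""))).length : Int))).sum = gRun ws := by
  induction ws with
  | nil => rfl
  | cons w rest ih =>
    match rest with
    | [] => simp [gRun]
    | x :: t =>
      rw [show (w :: x :: t : List String).length - 1 = ((x :: t : List String).length - 1) + 1 by simp,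
          List.range_succ_eq_map]
      simp only [List.map_cons, List.map_map, List.sum_cons]
      have hmap : ((fun i => ((((w :: x :: t : List String).drop (i + 1)).takeWhile
            (pfx ((w :: x :: t : List String).getD i ""))).length : Int)) ∘ (fun n => n + 1))
          = (fun i => ((((x :: t : List String).drop (i + 1)).takeWhile
            (pfx ((x :: t : List String).getD i ""))).length : Int)) := by
        funext i; rfl
      rw [hmap, ih]
      rfl

theorem gRun_eq_alt (l : List String) (hp : l.Pairwise (· ≤ ·)) :
    gRun l = solution_alt l := by
  induction l with
  | nil => rfl
  | cons w rest ih =>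
    rcases List.pairwise_cons.mp hp with ⟨hw, hrest⟩
    rw [gRun, alt_cons, ih hrest, takeWhile_eq_countP w rest hrest hw,
        countP_symR_eq_pfx w rest hw]

theorem indexed_eq_gRun (ws : List String) :
    (List.range (ws.length - 1)).foldl
      (fun count i => count + solWhile ws (ws.getD i "") (i + 1)) 0 = gRun ws := by
  rw [show (fun (count : Int) i => count + solWhile ws (ws.getD i "") (i + 1))
      = (fun count i => count + (((ws.drop (i + 1)).takeWhile (pfx (ws.getD i ""))).length : Int))
    from by funext c i; rw [solWhile_eq]]
  rw [foldl_add_eq_sum, sum_range_eq_gRun]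
  simp

theorem solution_eq_gRun (words : List String) :
    solution words = gRun (PySem.List.sorted words (fun x => x) false) :=
  indexed_eq_gRun _

-- ===== VERDICT (by name: the statement is the Claim_ definition above) =====
theorem solution_spec : Claim_equal_solution := by
  intro words _
  show solution words = solution_alt words
  rw [solution_eq_gRun,
      gRun_eq_alt _ (by simpa using PySem.List.sorted_pairwise words (fun x => x)),
      alt_perm (PySem.List.sorted_perm words (fun x => x) false)]
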